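-- pv_equiv track=rewrite | github.com/anildhaker/DataStructures | Arrays/maxSumValue.py | maximumSum
-- ===== SOURCE A (Python) =====
-- def maximumSum(arr):
--   ArrSum = 0
--   curVal = 0
--
--   for i in range(len(arr)):
--     ArrSum += arr[i]
--     curVal += i*arr[i]
--
--   maxVal = curVal
--   n = len(arr)
--   for j in range(1, len(arr)):
--     curVal += ArrSum - n * arr[n - j]
--
--     if curVal > maxVal:
--       maxVal = curVal
--
--   return maxVal
--
-- arr = [10,1, 2, 3, 4, 5, 6, 7, 8, 9]
-- ===== SOURCE B (Python) =====
-- def maximumSum(arr):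
--     n = len(arr)
--     sums = [sum(i * arr[(r + i) % n] for i in range(n)) for r in range(n)]
--     return max(sums) if sums else 0
-- ===== Notes on version B (the rewrite author's own statement) =====
-- stated objective: alternative
-- what changed: A maintains the rotation sum incrementally with the O(1) update curVal += S - n*arr[n-j]; B independently recomputes the weighted sum of every rotation by a full rescan (sum of i*arr[(r+i)%n] for each r) and takes the max of the collected list.
import Mathlib
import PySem

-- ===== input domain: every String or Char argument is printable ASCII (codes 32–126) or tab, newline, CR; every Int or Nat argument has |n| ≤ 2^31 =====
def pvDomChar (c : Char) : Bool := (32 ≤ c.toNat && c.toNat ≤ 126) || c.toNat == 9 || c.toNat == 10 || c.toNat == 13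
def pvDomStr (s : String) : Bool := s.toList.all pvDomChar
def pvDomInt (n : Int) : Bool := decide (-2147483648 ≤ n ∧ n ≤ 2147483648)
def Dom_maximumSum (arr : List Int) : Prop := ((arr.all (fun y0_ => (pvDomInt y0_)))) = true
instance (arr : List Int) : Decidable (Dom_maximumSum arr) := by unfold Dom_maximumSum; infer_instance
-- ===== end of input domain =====

-- B replaces A's O(n) incremental rotation update with independent full re-scans of every
-- rotation (an alternative, brute-force strategy; not faster).

-- ===== PORT A =====
def maximumSum (arr : List Int) : Int :=
  let p := (PySem.List.pyRange 0 (PySem.List.len arr) 1).foldl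
    (fun (st : Int × Int) i =>
      (st.1 + PySem.List.pyGetD arr i 0, st.2 + i * PySem.List.pyGetD arr i 0)) (0, 0)
  let arrSum := p.1
  let n := PySem.List.len arr
  let q := (PySem.List.pyRange 1 (PySem.List.len arr) 1).foldl
    (fun (st : Int × Int) j =>
      let cur := st.1 + (arrSum - n * PySem.List.pyGetD arr (n - j) 0)
      (cur, if cur > st.2 then cur else st.2)) (p.2, p.2)
  q.2

-- ===== PORT B =====
def maximumSum_alt (arr : List Int) : Int :=
  let n := PySem.List.len arr
  let sums := (PySem.List.pyRange 0 n 1).map (fun r =>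
    ((PySem.List.pyRange 0 n 1).map (fun i =>
      i * PySem.List.pyGetD arr (PySem.Int.mod (r + i) n) 0)).sum)
  if sums = [] then 0 else (PySem.List.max? sums (fun x => x)).getD 0

-- ===== PRECONDITION & SPEC =====
def Spec_maximumSum (arr : List Int) (out : Int) : Prop := out = maximumSum_alt arr
instance (arr : List Int) (out : Int) : Decidable (Spec_maximumSum arr out) := by unfold Spec_maximumSum; infer_instance

-- ===== CLAIM (what is proved, stated in full; the proofs are below) =====
def Claim_equal_maximumSum : Prop := ∀ (arr : List Int), Dom_maximumSum arr → Spec_maximumSum arr (maximumSum arr)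

-- ===== LEMMAS AND PROOFS =====

-- weighted sum Σ (k+i)·xs[i], the quantity both programs maximise over rotations
def pvW (k : Int) (xs : List Int) : Int :=
  match xs with
  | [] => 0
  | x :: t => k * x + pvW (k + 1) t

-- value of rotation r
def pvV (arr : List Int) (r : Nat) : Int := pvW 0 (arr.rotate r)

theorem pvW_append_singleton (ys : List Int) (x : Int) : ∀ k, pvW k (ys ++ [x]) = pvW k ys + (k + ys.length) * x := by
  induction ys with
  | nil => intro k; simp [pvW]
  | cons y t ih => intro k; simp [pvW, ih (k+1)]; ring

theorem pvW_succ (ys : List Int) : ∀ k, pvW (k + 1) ys = pvW k ys + ys.sum := by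
  induction ys with
  | nil => intro k; simp [pvW]
  | cons y t ih =>
    intro k
    simp only [pvW, List.sum_cons]
    rw [ih (k+1), ih k]
    ring

theorem pvW_eq_sum (xs : List Int) : ∀ k, pvW k xs = ((List.range xs.length).map (fun (i : Nat) => (k + (i : Int)) * xs.getD i 0)).sum := by
  induction xs with
  | nil => intro k; simp [pvW]
  | cons x t ih =>
    intro k
    simp only [pvW, List.length_cons, List.range_succ_eq_map, List.map_cons, List.map_map, List.sum_cons]
    rw [ih (k+1)]
    simp only [List.getD_cons_zero, Function.comp_def, Nat.succ_eq_add_one, List.getD_cons_succ]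
    congr 1
    · push_cast; ring
    · congr 1
      apply List.map_congr_left
      intro i _
      push_cast; ring

theorem pvV_step (arr : List Int) (r : Nat) (hr : r < arr.length) :
    pvV arr (r + 1) = pvV arr r - arr.sum + arr.length * arr.getD r 0 := by
  have hlr : (arr.rotate r).length = arr.length := List.length_rotate arr r
  have hne : arr.rotate r ≠ [] := by
    intro h; rw [h] at hlr; simp at hlr; omega
  obtain ⟨x, ys, hxy⟩ := List.exists_cons_of_ne_nil hne
  have hlen : ys.length + 1 = arr.length := by
    rw [hxy] at hlr; simpa using hlr
  have h0lt : 0 < (arr.rotate r).length := by omega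
  have hx : x = arr.getD r 0 := by
    have h0 : (arr.rotate r)[0]'h0lt = x := by simp [hxy]
    rw [List.getElem_rotate] at h0
    rw [List.getD_eq_getElem arr 0 (n := r) (by omega)]
    rw [← h0]
    congr 1
    rw [Nat.zero_add, Nat.mod_eq_of_lt hr]
  have hsum : x + ys.sum = arr.sum := by
    have hp := (List.rotate_perm arr r).sum_eq
    rw [hxy] at hp; simpa using hp
  have hrot1 : arr.rotate (r + 1) = ys ++ [x] := by
    rw [← List.rotate_rotate arr r 1, hxy, List.rotate_cons_succ, List.rotate_zero]
  unfold pvV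
  rw [hrot1, hxy, pvW_append_singleton ys x 0]
  simp only [pvW]
  rw [pvW_succ ys 0]
  rw [← hx, ← hsum, ← hlen]
  push_cast
  ring

theorem pvV_rot_len (arr : List Int) : pvV arr arr.length = pvV arr 0 := by
  unfold pvV
  rw [List.rotate_length, List.rotate_zero]

-- B's inner rescan of rotation r equals pvV arr r
theorem pvB_inner (arr : List Int) (r : Nat) :
    ((List.range arr.length).map (fun (i : Nat) => ((i : Int)) * arr.getD ((r + i) % arr.length) 0)).sum = pvV arr r := by
  unfold pvV
  rw [pvW_eq_sum (arr.rotate r) 0, List.length_rotate]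
  congr 1
  apply List.map_congr_left
  intro i hi
  simp only [List.mem_range] at hi
  have hn : 0 < arr.length := by omega
  have hin : (i + r) % arr.length < arr.length := Nat.mod_lt _ hn
  have hin' : (r + i) % arr.length < arr.length := Nat.mod_lt _ hn
  rw [List.getD_eq_getElem arr 0 hin',
      List.getD_eq_getElem (arr.rotate r) 0 (n := i) (by rw [List.length_rotate]; exact hi),
      List.getElem_rotate]
  rw [zero_add]
  congr 1
  simp [Nat.add_comm]

-- sum over range of getD is the list sum
theorem pv_sum_range_getD (xs : List Int) :
    ((List.range xs.length).map (fun i => xs.getD i 0)).sum = xs.sum := by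
  induction xs with
  | nil => simp
  | cons x t ih =>
    simp only [List.length_cons, List.range_succ_eq_map, List.map_cons, List.map_map, List.sum_cons,
      List.getD_cons_zero, Function.comp_def, Nat.succ_eq_add_one, List.getD_cons_succ]
    rw [ih]

-- A's first loop
theorem pvA_loop1 (arr : List Int) (m : Nat) :
    (List.map (fun (k : Nat) => (k : Int)) (List.range m)).foldl
      (fun (st : Int × Int) i =>
        (st.1 + PySem.List.pyGetD arr i 0, st.2 + i * PySem.List.pyGetD arr i 0)) (0, 0)
    = (((List.range m).map (fun (i : Nat) => arr.getD i 0)).sum,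
       ((List.range m).map (fun (i : Nat) => ((i : Int)) * arr.getD i 0)).sum) := by
  induction m with
  | zero => simp
  | succ m ih =>
    rw [List.range_succ, List.map_append, List.foldl_append, ih]
    simp [List.sum_append]

-- A's second loop invariant
theorem pvA_loop2 (arr : List Int) (S : Int) (hS : S = arr.sum) (hne : arr ≠ []) (m : Nat)
    (hm : m ≤ arr.length - 1) :
    ∃ mx : Int,
      ((List.map (fun (k : Nat) => (1 : Int) + (k : Int)) (List.range m)).foldl
        (fun (st : Int × Int) j =>
          ((st.1 + (S - (arr.length : Int) * PySem.List.pyGetD arr ((arr.length : Int) - j) 0)),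
           if (st.1 + (S - (arr.length : Int) * PySem.List.pyGetD arr ((arr.length : Int) - j) 0)) > st.2
           then (st.1 + (S - (arr.length : Int) * PySem.List.pyGetD arr ((arr.length : Int) - j) 0))
           else st.2)) (pvV arr arr.length, pvV arr arr.length))
      = (pvV arr (arr.length - m), mx)
      ∧ (∃ r < arr.length, mx = pvV arr r)
      ∧ (∀ j ≤ m, pvV arr (arr.length - j) ≤ mx) := by
  have hn : 0 < arr.length := List.length_pos_iff.mpr hne
  revert hm
  induction m with
  | zero =>
    intro _
    refine ⟨pvV arr arr.length, by simp, ⟨0, hn, pvV_rot_len arr⟩, ?_⟩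
    intro j hj
    interval_cases j
    simp [pvV_rot_len arr]
  | succ m ih =>
    intro hm
    obtain ⟨mx, hfold, ⟨r0, hr0, hmx⟩, hub⟩ := ih (by omega)
    rw [List.range_succ, List.map_append, List.foldl_append, hfold]
    simp only [List.map_cons, List.map_nil, List.foldl_cons, List.foldl_nil]
    have hidx : (arr.length : Int) - (1 + (m : Int)) = ((arr.length - (m + 1) : Nat) : Int) := by
      omega
    rw [hidx, PySem.List.pyGetD_natCast]
    set r := arr.length - (m + 1) with hrdef
    have hr : r < arr.length := by omega
    have hstep := pvV_step arr r hr
    have hr1 : r + 1 = arr.length - m := by omega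
    rw [hr1] at hstep
    have hcur : pvV arr (arr.length - m) + (S - (arr.length : Int) * arr.getD r 0) = pvV arr r := by
      rw [hstep, hS]; ring
    rw [hcur]
    refine ⟨if pvV arr r > mx then pvV arr r else mx, rfl, ?_, ?_⟩
    · split_ifs with h
      · exact ⟨r, hr, rfl⟩
      · exact ⟨r0, hr0, hmx⟩
    · intro j hj
      rcases Nat.lt_or_ge j (m + 1) with hjm | hjm
      · have := hub j (by omega)
        split_ifs with h
        · omega
        · exact this
      · have hj1 : j = m + 1 := by omega
        subst hj1
        rw [← hrdef]
        split_ifs with h <;> omega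

theorem pv_sums_eq (arr : List Int) :
    (List.map (fun (k : Nat) => (k : Int)) (List.range arr.length)).map (fun r =>
      ((List.map (fun (k : Nat) => (k : Int)) (List.range arr.length)).map (fun i =>
        i * PySem.List.pyGetD arr (PySem.Int.mod (r + i) (arr.length : Int)) 0)).sum)
    = (List.range arr.length).map (pvV arr) := by
  rw [List.map_map]
  apply List.map_congr_left
  intro r hr
  simp only [Function.comp_def]
  rw [← pvB_inner arr r, List.map_map]
  congr 1
  apply List.map_congr_left
  intro i hi
  simp only [Function.comp_def]
  have hcast : ((r : Int) + (i : Int)) = ((r + i : Nat) : Int) := by push_cast; ring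
  rw [hcast, PySem.Int.mod_natCast, PySem.List.pyGetD_natCast]

theorem pvV_zero_eq (arr : List Int) :
    ((List.range arr.length).map (fun (i : Nat) => ((i : Int)) * arr.getD i 0)).sum = pvV arr 0 := by
  unfold pvV
  rw [List.rotate_zero, pvW_eq_sum arr 0]
  congr 1
  apply List.map_congr_left
  intro i _
  rw [zero_add]

theorem maximumSum_spec : Claim_equal_maximumSum := by
  unfold Claim_equal_maximumSum
  intro arr _
  unfold Spec_maximumSum maximumSum maximumSum_alt
  by_cases hne : arr = []
  · subst hne; rfl
  · have hn : 0 < arr.length := List.length_pos_iff.mpr hne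
    simp only [PySem.List.len_eq, PySem.List.pyRange_zero_natCast]
    rw [pv_sums_eq arr]
    -- B's branch: sums nonempty, max? = some mB
    have hsne : (List.range arr.length).map (pvV arr) ≠ [] := by
      simp [hne]
    rw [pvA_loop1 arr arr.length]
    simp only [pv_sum_range_getD, pvV_zero_eq]
    rw [← pvV_rot_len arr]
    rw [PySem.List.pyRange_one 1 (arr.length : Int)]
    have ht : ((arr.length : Int) - 1).toNat = arr.length - 1 := by omega
    rw [ht]
    obtain ⟨mx, hfold, ⟨r0, hr0, hmx⟩, hub⟩ :=
      pvA_loop2 arr arr.sum rfl hne (arr.length - 1) le_rfl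
    rw [hfold, if_neg hsne]
    cases hmax : PySem.List.max? ((List.range arr.length).map (pvV arr)) (fun x => x) with
    | none =>
      rw [PySem.List.max?_eq_none_iff] at hmax
      exact absurd hmax hsne
    | some mB =>
      simp only [Option.getD_some]
      have hBmem := PySem.List.max?_mem hmax
      have hBmax := PySem.List.max?_isMax hmax
      apply le_antisymm
      · have hmem : pvV arr r0 ∈ (List.range arr.length).map (pvV arr) :=
          List.mem_map_of_mem (List.mem_range.mpr hr0)
        rw [hmx]
        exact hBmax _ hmem
      · obtain ⟨r1, hr1, hr1eq⟩ := List.mem_map.mp hBmem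
        rw [List.mem_range] at hr1
        rw [← hr1eq]
        by_cases h0 : r1 = 0
        · subst h0
          have h := hub 0 (Nat.zero_le _)
          rwa [Nat.sub_zero, pvV_rot_len] at h
        · have h := hub (arr.length - r1) (by omega)
          have he : arr.length - (arr.length - r1) = r1 := by omega
          rwa [he] at h
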